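-- pv_equiv track=rewrite | github.com/rob256/adventofcode2020 | python3/day_11/day_11_2.py | run_round
-- ===== SOURCE A (Python) =====
-- from typing import List, Tuple
--
-- SeatingPlan = List[List[int]]
--
-- def run_round(seating_plan: SeatingPlan) -> SeatingPlan:
--     new_seating_plan = []
--     for i, seating_row in enumerate(seating_plan):
--         new_seating_row = []
--         new_seating_plan.append(new_seating_row)
--         for j, seat in enumerate(seating_row):
--             adjacent_occupied_seats = get_adjacent_occupied_seats(seating_plan, i, j)
--             if seat == 1 and adjacent_occupied_seats == 0:
--                 new_seating_row.append(2)
--             elif seat == 2 and adjacent_occupied_seats >= 5: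
--                 new_seating_row.append(1)
--             else:
--                 new_seating_row.append(seat)
--     return new_seating_plan
--
-- def get_adjacent_occupied_seats(seating_plan: SeatingPlan, i: int, j: int) -> int:
--     total = 0
--     directions = [
--         (-1, -1),
--         (-1, 0),
--         (-1, 1),
--         (0, -1),
--         (0, 1),
--         (1, -1),
--         (1, 0),
--         (1, 1),
--     ]
--
--     for direction in directions:
--         first_seat = get_first_adjacent_seat(seating_plan, i, j, direction)
--         if first_seat == 2:
--             total += 1
--
--     return total
--
-- def get_first_adjacent_seat(seating_plan: SeatingPlan, i: int, j: int, direction: Tuple[int, int]):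
--     distance = 1
--     i_direction, j_direction = direction
--
--     while True:
--         _i = i_direction * distance
--         _j = j_direction * distance
--         if i + _i < 0:
--             return 0
--         if j + _j < 0:
--             return 0
--         try:
--             seat = seating_plan[i + _i][j + _j]
--             if seat > 0:
--                 return seat
--         except IndexError:
--             return 0
--         distance += 1
-- ===== SOURCE B (Python) =====
-- # Directional-sweep re-implementation: each of the 8 "first visible seat" tables is
-- # computed by propagating along the direction, instead of casting a ray per cell.
--
-- def _shift(prev, dj, width):
--     # vis row for a row whose neighbour row (in the scan direction) is prev = (values, vis)
--     if prev is None: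
--         return [0] * width
--     vals, vis = prev
--     out = []
--     for j in range(width):
--         nj = j + dj
--         if nj < 0 or nj >= len(vals):
--             out.append(0)
--         else:
--             out.append(vals[nj] if vals[nj] > 0 else vis[nj])
--     return out
--
-- def _sweep(rows, dj):
--     # rows in processing order; neighbour of each row is the previously processed one
--     out = []
--     prev = None
--     for row in rows:
--         cur = _shift(prev, dj, len(row))
--         out.append(cur)
--         prev = (row, cur)
--     return out
--
-- def _scan(row):
--     # direction (0,-1): first positive value strictly to the left
--     out = []
--     s = 0
--     for v in row:
--         out.append(s)
--         s = v if v > 0 else s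
--     return out
--
-- def _scan_rev(row):
--     # direction (0,1): same scan on the reversed row
--     out = _scan(row[::-1])
--     out.reverse()
--     return out
--
-- def _new_seat(seat, occ):
--     if seat == 1 and occ == 0:
--         return 2
--     if seat == 2 and occ >= 5:
--         return 1
--     return seat
--
-- def run_round(seating_plan):
--     tables = []
--     for dj in (-1, 0, 1):                      # directions (-1, dj): scan top to bottom
--         tables.append(_sweep(seating_plan, dj))
--     for dj in (-1, 0, 1):                      # directions (1, dj): scan bottom to top
--         t = _sweep(seating_plan[::-1], dj)
--         t.reverse()
--         tables.append(t)
--     tables.append([_scan(row) for row in seating_plan])      # (0, -1)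
--     tables.append([_scan_rev(row) for row in seating_plan])  # (0, 1)
--     return [
--         [_new_seat(seat, sum(1 for t in tables if t[i][j] == 2))
--          for j, seat in enumerate(row)]
--         for i, row in enumerate(seating_plan)
--     ]
-- ===== Notes on version B (the rewrite author's own statement) =====
-- stated objective: alternative
-- what changed: Replaces the per-cell ray walk in 8 directions by eight whole-grid directional sweeps that propagate each cell's first visible seat from its neighbour in the scan direction.
import Mathlib
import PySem

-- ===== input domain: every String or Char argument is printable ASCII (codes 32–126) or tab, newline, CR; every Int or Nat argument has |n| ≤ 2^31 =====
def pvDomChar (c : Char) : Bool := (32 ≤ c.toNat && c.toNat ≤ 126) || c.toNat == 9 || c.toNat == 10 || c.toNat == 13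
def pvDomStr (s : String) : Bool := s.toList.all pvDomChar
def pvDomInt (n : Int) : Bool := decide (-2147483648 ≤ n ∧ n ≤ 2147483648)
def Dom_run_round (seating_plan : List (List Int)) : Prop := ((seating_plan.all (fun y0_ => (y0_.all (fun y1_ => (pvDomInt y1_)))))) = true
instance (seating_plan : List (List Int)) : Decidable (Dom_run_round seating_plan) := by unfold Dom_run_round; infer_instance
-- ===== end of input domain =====

-- B replaces A's per-cell ray casting by eight whole-grid directional sweeps, each propagating
-- the first visible seat from the neighbouring cell in the scan direction. No argument is mutated.

-- ===== PORT A =====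

-- seating_plan[a][b] for a,b ≥ 0; none = IndexError (caught by A's try/except)
def pvCell? (plan : List (List Int)) (a b : Int) : Option Int :=
  match PySem.List.pyGet? plan a with
  | none => none
  | some row => PySem.List.pyGet? row b

def pvMaxLen (plan : List (List Int)) : Nat :=
  plan.foldr (fun r m => max r.length m) 0

-- A's `while True` loop over growing distance; the fuel is a pure totality guard:
-- for the (in-range) calls run_round makes, the loop provably exits within the fuel.
def firstSeatGo (plan : List (List Int)) (idir jdir i j : Int) : Nat → Int → Int
  | 0, _ => 0
  | fuel + 1, d =>
    if i + idir * d < 0 then 0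
    else if j + jdir * d < 0 then 0
    else
      match pvCell? plan (i + idir * d) (j + jdir * d) with
      | none => 0
      | some seat => if seat > 0 then seat else firstSeatGo plan idir jdir i j fuel (d + 1)

def get_first_adjacent_seat (plan : List (List Int)) (i j : Int) (dir : Int × Int) : Int :=
  firstSeatGo plan dir.1 dir.2 i j (plan.length + pvMaxLen plan + 2) 1

def pvDirections : List (Int × Int) :=
  [(-1, -1), (-1, 0), (-1, 1), (0, -1), (0, 1), (1, -1), (1, 0), (1, 1)]

def get_adjacent_occupied_seats (plan : List (List Int)) (i j : Int) : Int :=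
  pvDirections.foldl
    (fun total dir => if get_first_adjacent_seat plan i j dir = 2 then total + 1 else total) 0

def run_round (seating_plan : List (List Int)) : List (List Int) :=
  (PySem.List.enumerate seating_plan).foldl
    (fun (acc : List (List Int)) (p : Int × List Int) =>
      acc ++ [(PySem.List.enumerate p.2).foldl
        (fun (racc : List Int) (q : Int × Int) =>
          let adj := get_adjacent_occupied_seats seating_plan p.1 q.1
          racc ++ [if q.2 = 1 ∧ adj = 0 then 2
                   else if q.2 = 2 ∧ adj ≥ 5 then 1
                   else q.2]) ([] : List Int)]) ([] : List (List Int))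

-- ===== PORT B =====

-- vis row for a row whose neighbour row (in the scan direction) is prev = (values, vis)
def shiftRow (prev : Option (List Int × List Int)) (dj : Int) (width : Nat) : List Int :=
  match prev with
  | none => List.replicate width 0
  | some (vals, vis) =>
    (List.range width).map (fun (j : Nat) =>
      let nj : Int := (j : Int) + dj
      if nj < 0 ∨ (vals.length : Int) ≤ nj then 0
      else if vals.getD nj.toNat 0 > 0 then vals.getD nj.toNat 0 else vis.getD nj.toNat 0)

-- rows in processing order; neighbour of each row is the previously processed one
def sweepGo (dj : Int) (prev : Option (List Int × List Int)) : List (List Int) → List (List Int)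
  | [] => []
  | row :: rest =>
    let cur := shiftRow prev dj row.length
    cur :: sweepGo dj (some (row, cur)) rest

def sweep (rows : List (List Int)) (dj : Int) : List (List Int) := sweepGo dj none rows

-- direction (0,-1): first positive value strictly to the left
def scanGo (s : Int) : List Int → List Int
  | [] => []
  | v :: rest => s :: scanGo (if v > 0 then v else s) rest

def scanRow (row : List Int) : List Int := scanGo 0 row

-- direction (0,1): same scan on the reversed row
def scanRev (row : List Int) : List Int := (scanGo 0 row.reverse).reverse

def newSeat (seat occ : Int) : Int :=
  if seat = 1 ∧ occ = 0 then 2 else if seat = 2 ∧ occ ≥ 5 then 1 else seat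

def run_round_alt (seating_plan : List (List Int)) : List (List Int) :=
  let tables : List (List (List Int)) :=
    [sweep seating_plan (-1), sweep seating_plan 0, sweep seating_plan 1,
     (sweepGo (-1) none seating_plan.reverse).reverse,
     (sweepGo 0 none seating_plan.reverse).reverse,
     (sweepGo 1 none seating_plan.reverse).reverse,
     seating_plan.map scanRow, seating_plan.map scanRev]
  (PySem.List.enumerate seating_plan).map (fun (p : Int × List Int) =>
    (PySem.List.enumerate p.2).map (fun (q : Int × Int) =>
      newSeat q.2
        (tables.foldl
          (fun occ t =>
            if PySem.List.pyGetD (PySem.List.pyGetD t p.1 []) q.1 0 = 2 then occ + 1 else occ)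
          0)))

-- ===== PRECONDITION & SPEC =====
def Spec_run_round (seating_plan : List (List Int)) (out : List (List Int)) : Prop := out = run_round_alt seating_plan
instance (seating_plan : List (List Int)) (out : List (List Int)) : Decidable (Spec_run_round seating_plan out) := by unfold Spec_run_round; infer_instance

-- ===== CLAIM (what is proved, stated in full; the proofs are below) =====
def Claim_equal_run_round : Prop := ∀ (seating_plan : List (List Int)), Dom_run_round seating_plan → Spec_run_round seating_plan (run_round seating_plan)

-- ===== LEMMAS AND PROOFS =====

-- canonical "first visible seat from (i,j) in direction (di,dj)" (A's helper, direction unpaired)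
def pvF (plan : List (List Int)) (di dj i j : Int) : Int :=
  get_first_adjacent_seat plan i j (di, dj)

-- the expected vis row for row i of the table for direction (di,dj)
def pvVisRow (plan : List (List Int)) (di dj : Int) (i : Nat) : List Int :=
  (List.range (plan.getD i []).length).map (fun j : Nat => pvF plan di dj (i : Int) (j : Int))

lemma pvGet_lt {α : Type} (l : List α) (i : Int) (d : α) (h0 : 0 ≤ i) (h : i < (l.length : Int)) :
    PySem.List.pyGet? l i = some (l.getD i.toNat d) := by
  unfold PySem.List.pyGet? PySem.List.pyIdx?
  rw [if_pos h0, if_pos h]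
  simp only [Option.bind_some]
  rw [List.getElem?_eq_getElem (by omega), List.getD_eq_getElem l d (by omega)]

lemma pvGet_ge {α : Type} (l : List α) (i : Int) (h0 : 0 ≤ i) (h : (l.length : Int) ≤ i) :
    PySem.List.pyGet? l i = none := by
  unfold PySem.List.pyGet? PySem.List.pyIdx?
  rw [if_pos h0, if_neg (by omega)]; rfl

lemma pvCell?_some_of (plan : List (List Int)) (a b : Int) (r : List Int)
    (h : PySem.List.pyGet? plan a = some r) :
    pvCell? plan a b = PySem.List.pyGet? r b := by
  unfold pvCell?; rw [h]

lemma pvCell?_none_of (plan : List (List Int)) (a b : Int)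
    (h : PySem.List.pyGet? plan a = none) :
    pvCell? plan a b = none := by
  unfold pvCell?; rw [h]

lemma pvLen_le_maxLen (plan : List (List Int)) (i : Nat) :
    (plan.getD i []).length ≤ pvMaxLen plan := by
  induction plan generalizing i with
  | nil => cases i <;> simp [pvMaxLen]
  | cons r rest ih =>
    cases i with
    | zero => simp [pvMaxLen]
    | succ k =>
      rw [List.getD_cons_succ]
      exact le_trans (ih k) (le_max_right _ _)

-- distance-shift: the walk from (i,j) at distance d+1 is the walk from the neighbour at distance d
lemma pvShift (plan : List (List Int)) (di dj i j : Int) :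
    ∀ (fuel : Nat) (d : Int),
      firstSeatGo plan di dj i j fuel (d + 1) = firstSeatGo plan di dj (i + di) (j + dj) fuel d := by
  intro fuel
  induction fuel with
  | zero => intro d; rfl
  | succ f ih =>
    intro d
    have e1 : i + di * (d + 1) = (i + di) + di * d := by ring
    have e2 : j + dj * (d + 1) = (j + dj) + dj * d := by ring
    simp only [firstSeatGo, e1, e2, ih]

-- once the distance is big enough the walk has left the grid: result 0 for every fuel
lemma pvBigZero (plan : List (List Int)) (di dj : Int)
    (hdi : di = -1 ∨ di = 0 ∨ di = 1) (hdj : dj = -1 ∨ dj = 0 ∨ dj = 1)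
    (hne : ¬(di = 0 ∧ dj = 0)) (i j : Int)
    (hi0 : 0 ≤ i) (hiR : i < (plan.length : Int)) (hj0 : 0 ≤ j) (hjM : j < (pvMaxLen plan : Int)) :
    ∀ (fuel : Nat) (d : Int), ((plan.length : Int) + (pvMaxLen plan : Int)) ≤ d →
      firstSeatGo plan di dj i j fuel d = 0 := by
  intro fuel d hd
  cases fuel with
  | zero => rfl
  | succ f =>
    simp only [firstSeatGo]
    rcases hdi with h | h | h <;> subst h
    · rw [if_pos (by omega)]
    · rcases hdj with h | h | h <;> subst h
      · rw [if_neg (by omega), if_pos (by omega)]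
      · exact absurd ⟨rfl, rfl⟩ hne
      · rw [if_neg (by omega), if_neg (by omega)]
        rw [show i + 0 * d = i by ring, show j + 1 * d = j + d by ring]
        rw [pvCell?_some_of plan _ _ _ (pvGet_lt plan i [] hi0 hiR),
          pvGet_ge _ _ (by omega) (by
            have := pvLen_le_maxLen plan i.toNat
            omega)]
    · rw [if_neg (by omega)]
      by_cases h2 : j + dj * d < 0
      · rw [if_pos h2]
      · rw [if_neg h2]
        rw [show i + 1 * d = i + d by ring]
        rw [pvCell?_none_of plan _ _ (pvGet_ge _ _ (by omega) (by omega))]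

-- enough fuel makes the result fuel-independent
lemma pvFuelIrrel (plan : List (List Int)) (di dj : Int)
    (hdi : di = -1 ∨ di = 0 ∨ di = 1) (hdj : dj = -1 ∨ dj = 0 ∨ dj = 1)
    (hne : ¬(di = 0 ∧ dj = 0)) (i j : Int)
    (hi0 : 0 ≤ i) (hiR : i < (plan.length : Int)) (hj0 : 0 ≤ j) (hjM : j < (pvMaxLen plan : Int)) :
    ∀ (fuel₁ fuel₂ : Nat) (d : Int),
      ((plan.length : Int) + (pvMaxLen plan : Int)) ≤ d + fuel₁ →
      ((plan.length : Int) + (pvMaxLen plan : Int)) ≤ d + fuel₂ →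
      firstSeatGo plan di dj i j fuel₁ d = firstSeatGo plan di dj i j fuel₂ d := by
  intro fuel₁
  induction fuel₁ with
  | zero =>
    intro f2 d h1 h2
    rw [pvBigZero plan di dj hdi hdj hne i j hi0 hiR hj0 hjM f2 d (by push_cast at h1; omega)]
    rfl
  | succ f ih =>
    intro f2 d h1 h2
    cases f2 with
    | zero =>
      rw [pvBigZero plan di dj hdi hdj hne i j hi0 hiR hj0 hjM (f + 1) d (by push_cast at h2; omega)]
      rfl
    | succ f2' =>
      have hrec := ih f2' (d + 1) (by push_cast at h1 ⊢; omega) (by push_cast at h2 ⊢; omega)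
      simp only [firstSeatGo, hrec]

lemma pvCell?_bounds (plan : List (List Int)) (a b v : Int)
    (h0a : 0 ≤ a) (h0b : 0 ≤ b) (hc : pvCell? plan a b = some v) :
    a < (plan.length : Int) ∧ b < ((plan.getD a.toNat []).length : Int) ∧
      v = (plan.getD a.toNat []).getD b.toNat 0 := by
  have hA : a < (plan.length : Int) := by
    by_contra hle
    rw [pvCell?_none_of plan _ _ (pvGet_ge _ _ h0a (by omega))] at hc; cases hc
  rw [pvCell?_some_of plan _ _ _ (pvGet_lt plan a [] h0a hA)] at hc
  have hB : b < ((plan.getD a.toNat []).length : Int) := by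
    by_contra hle
    rw [pvGet_ge _ _ h0b (by omega)] at hc; cases hc
  rw [pvGet_lt _ _ 0 h0b hB] at hc
  exact ⟨hA, hB, (Option.some_inj.mp hc).symm⟩

-- one unfolding of the fuelled walk
lemma pvGoSucc (plan : List (List Int)) (di dj i j : Int) (fuel : Nat) (d : Int) :
    firstSeatGo plan di dj i j (fuel + 1) d =
      if i + di * d < 0 then 0
      else if j + dj * d < 0 then 0
      else
        match pvCell? plan (i + di * d) (j + dj * d) with
        | none => 0
        | some seat => if seat > 0 then seat else firstSeatGo plan di dj i j fuel (d + 1) := rfl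

-- one unfolding of pvF at a valid cell
lemma pvF_step (plan : List (List Int)) (di dj : Int)
    (hdi : di = -1 ∨ di = 0 ∨ di = 1) (hdj : dj = -1 ∨ dj = 0 ∨ dj = 1)
    (hne : ¬(di = 0 ∧ dj = 0)) (i j : Nat) :
    pvF plan di dj i j =
      if (i : Int) + di < 0 ∨ (j : Int) + dj < 0 then 0
      else
        match pvCell? plan ((i : Int) + di) ((j : Int) + dj) with
        | none => 0
        | some v => if v > 0 then v else pvF plan di dj ((i : Int) + di) ((j : Int) + dj) := by
  conv_lhs => rw [pvF, get_first_adjacent_seat]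
  rw [show plan.length + pvMaxLen plan + 2 = (plan.length + pvMaxLen plan + 1) + 1 from rfl,
    pvGoSucc]
  simp only [mul_one]
  by_cases h1 : (i : Int) + di < 0
  · rw [if_pos h1, if_pos (Or.inl h1)]
  · rw [if_neg h1]
    by_cases h2 : (j : Int) + dj < 0
    · rw [if_pos h2, if_pos (Or.inr h2)]
    · rw [if_neg h2, if_neg (show ¬((i : Int) + di < 0 ∨ (j : Int) + dj < 0) by tauto)]
      cases hc : pvCell? plan ((i : Int) + di) ((j : Int) + dj) with
      | none => rfl
      | some v =>
        dsimp only
        by_cases hv : v > 0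
        · rw [if_pos hv, if_pos hv]
        · rw [if_neg hv, if_neg hv]
          obtain ⟨hA, hB, -⟩ := pvCell?_bounds plan _ _ v (by omega) (by omega) hc
          rw [pvShift plan di dj (i : Int) (j : Int) (plan.length + pvMaxLen plan + 1) 1,
            pvF, get_first_adjacent_seat]
          exact pvFuelIrrel plan di dj hdi hdj hne ((i : Int) + di) ((j : Int) + dj)
            (by omega) hA (by omega)
            (by have := pvLen_le_maxLen plan ((i : Int) + di).toNat; omega)
            (plan.length + pvMaxLen plan + 1) (plan.length + pvMaxLen plan + 2) 1
            (by push_cast; omega) (by push_cast; omega)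

-- the prev-state of the top-to-bottom sweep after k rows
def pvPrevD (plan : List (List Int)) (dj : Int) : Nat → Option (List Int × List Int)
  | 0 => none
  | k + 1 => some (plan.getD k [], pvVisRow plan (-1) dj k)

lemma pvShiftRow_down (plan : List (List Int)) (dj : Int)
    (hdj : dj = -1 ∨ dj = 0 ∨ dj = 1) (k : Nat) (hk : k < plan.length) :
    shiftRow (pvPrevD plan dj k) dj (plan.getD k []).length = pvVisRow plan (-1) dj k := by
  have hne : ¬((-1 : Int) = 0 ∧ dj = 0) := by simp
  cases k with
  | zero =>
    symm
    apply List.ext_getElem (by simp [pvVisRow, shiftRow, pvPrevD])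
    intro n h1 h2
    simp only [pvVisRow, List.getElem_map, List.getElem_range, pvPrevD, shiftRow,
      List.getElem_replicate]
    rw [pvF_step plan (-1) dj (Or.inl rfl) hdj hne 0 n, if_pos (Or.inl (by omega))]
  | succ k =>
    symm
    apply List.ext_getElem (by simp [pvVisRow, shiftRow, pvPrevD])
    intro n h1 h2
    simp only [pvVisRow, List.getElem_map, List.getElem_range, pvPrevD, shiftRow]
    rw [pvF_step plan (-1) dj (Or.inl rfl) hdj hne (k + 1) n]
    have hni : (↑(k + 1) : Int) + (-1) = (k : Int) := by push_cast; ring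
    by_cases h2' : (n : Int) + dj < 0
    · rw [if_pos (Or.inr h2'), if_pos (Or.inl h2')]
    · rw [if_neg (by omega), hni,
        pvCell?_some_of plan _ _ _ (pvGet_lt plan (k : Int) [] (by omega) (by push_cast; omega))]
      simp only [Int.toNat_natCast]
      by_cases h3 : ((plan.getD k []).length : Int) ≤ (n : Int) + dj
      · rw [if_pos (Or.inr h3), pvGet_ge _ _ (by omega) h3]
      · rw [if_neg (by omega), pvGet_lt _ _ 0 (by omega) (by omega)]
        dsimp only
        by_cases h4 : (plan.getD k []).getD ((n : Int) + dj).toNat 0 > 0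
        · rw [if_pos h4, if_pos h4]
        · rw [if_neg h4, if_neg h4,
            List.getD_eq_getElem?_getD, List.getElem?_map, List.getElem?_range
              (by omega : ((n : Int) + dj).toNat < (plan.getD k []).length)]
          simp only [Option.map_some, Option.getD_some]
          congr 1
          omega

lemma pvSweep_down (plan : List (List Int)) (dj : Int)
    (hdj : dj = -1 ∨ dj = 0 ∨ dj = 1) :
    ∀ (rows : List (List Int)) (k : Nat), plan.drop k = rows →
      sweepGo dj (pvPrevD plan dj k) rows =
        (List.range rows.length).map (fun t => pvVisRow plan (-1) dj (k + t)) := by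
  intro rows
  induction rows with
  | nil => intro k _; rfl
  | cons row rest ih =>
    intro k hdrop
    have hk : k < plan.length := by
      have := congrArg List.length hdrop
      simp only [List.length_drop, List.length_cons] at this
      omega
    have hrow : row = plan.getD k [] := by
      have h0 : (List.drop k plan)[0]'(by rw [hdrop]; simp) = plan[k + 0]'(by omega) :=
        List.getElem_drop
      rw [List.getD_eq_getElem plan [] hk]
      simpa [hdrop] using h0
    have hrest : List.drop (k + 1) plan = rest := by
      have h : List.drop 1 (List.drop k plan) = List.drop (k + 1) plan := List.drop_drop
      rw [hdrop] at h
      simpa using h.symm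
    show shiftRow (pvPrevD plan dj k) dj row.length :: sweepGo dj (some (row, _)) rest = _
    rw [hrow, pvShiftRow_down plan dj hdj k hk]
    have hprev : some (plan.getD k [], pvVisRow plan (-1) dj k) = pvPrevD plan dj (k + 1) := rfl
    rw [hprev, ih (k + 1) hrest, List.length_cons, List.range_succ_eq_map, List.map_cons,
      List.map_map]
    congr 1
    refine List.map_congr_left fun t _ => ?_
    simp only [Function.comp_apply]
    congr 1
    omega

-- reversing a map over range
lemma pvRevMapRange {α : Type} (n : Nat) (g : Nat → α) :
    ((List.range n).map g).reverse = (List.range n).map (fun t => g (n - 1 - t)) := by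
  apply List.ext_getElem (by simp)
  intro i h1 h2
  simp [List.getElem_reverse]

-- the prev-state of the bottom-to-top sweep after k rows
def pvPrevU (plan : List (List Int)) (dj : Int) : Nat → Option (List Int × List Int)
  | 0 => none
  | k + 1 => some (plan.getD (plan.length - 1 - k) [], pvVisRow plan 1 dj (plan.length - 1 - k))

lemma pvShiftRow_up (plan : List (List Int)) (dj : Int)
    (hdj : dj = -1 ∨ dj = 0 ∨ dj = 1) (k : Nat) (hk : k < plan.length) :
    shiftRow (pvPrevU plan dj k) dj (plan.getD (plan.length - 1 - k) []).length =
      pvVisRow plan 1 dj (plan.length - 1 - k) := by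
  have hne : ¬((1 : Int) = 0 ∧ dj = 0) := by simp
  cases k with
  | zero =>
    symm
    apply List.ext_getElem (by simp [pvVisRow, shiftRow, pvPrevU])
    intro n h1 h2
    simp only [pvVisRow, List.getElem_map, List.getElem_range, pvPrevU, shiftRow,
      List.getElem_replicate]
    rw [pvF_step plan 1 dj (Or.inr (Or.inr rfl)) hdj hne (plan.length - 1 - 0) n]
    by_cases h2' : (n : Int) + dj < 0
    · rw [if_pos (Or.inr h2')]
    · rw [if_neg (by omega),
        pvCell?_none_of plan _ _ (pvGet_ge _ _ (by omega) (by omega))]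
  | succ k =>
    symm
    apply List.ext_getElem (by simp [pvVisRow, shiftRow, pvPrevU])
    intro n h1 h2
    simp only [pvVisRow, List.getElem_map, List.getElem_range, pvPrevU, shiftRow]
    rw [pvF_step plan 1 dj (Or.inr (Or.inr rfl)) hdj hne (plan.length - 1 - (k + 1)) n]
    have hni : (↑(plan.length - 1 - (k + 1)) : Int) + 1 = (↑(plan.length - 1 - k) : Int) := by
      omega
    by_cases h2' : (n : Int) + dj < 0
    · rw [if_pos (Or.inr h2'), if_pos (Or.inl h2')]
    · rw [if_neg (by omega), hni,
        pvCell?_some_of plan _ _ _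
          (pvGet_lt plan (↑(plan.length - 1 - k) : Int) [] (by omega) (by omega))]
      simp only [Int.toNat_natCast]
      by_cases h3 : ((plan.getD (plan.length - 1 - k) []).length : Int) ≤ (n : Int) + dj
      · rw [if_pos (Or.inr h3), pvGet_ge _ _ (by omega) h3]
      · rw [if_neg (by omega), pvGet_lt _ _ 0 (by omega) (by omega)]
        dsimp only
        by_cases h4 : (plan.getD (plan.length - 1 - k) []).getD ((n : Int) + dj).toNat 0 > 0
        · rw [if_pos h4, if_pos h4]
        · rw [if_neg h4, if_neg h4,
            List.getD_eq_getElem?_getD, List.getElem?_map, List.getElem?_range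
              (by omega : ((n : Int) + dj).toNat < (plan.getD (plan.length - 1 - k) []).length)]
          simp only [Option.map_some, Option.getD_some]
          congr 1
          omega

lemma pvSweep_up (plan : List (List Int)) (dj : Int)
    (hdj : dj = -1 ∨ dj = 0 ∨ dj = 1) :
    ∀ (rows : List (List Int)) (k : Nat), plan.reverse.drop k = rows →
      sweepGo dj (pvPrevU plan dj k) rows =
        (List.range rows.length).map (fun t => pvVisRow plan 1 dj (plan.length - 1 - (k + t))) := by
  intro rows
  induction rows with
  | nil => intro k _; rfl
  | cons row rest ih =>
    intro k hdrop
    have hk : k < plan.length := by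
      have := congrArg List.length hdrop
      simp only [List.length_drop, List.length_cons, List.length_reverse] at this
      omega
    have hrow : row = plan.getD (plan.length - 1 - k) [] := by
      have h0 : (List.drop k plan.reverse)[0]'(by rw [hdrop]; simp) =
          plan.reverse[k + 0]'(by simpa using hk) := List.getElem_drop
      rw [List.getD_eq_getElem plan [] (by omega)]
      have h0' := h0
      rw [List.getElem_reverse] at h0'
      simp only [hdrop, List.getElem_cons_zero, Nat.add_zero] at h0'
      exact h0'
    have hrest : List.drop (k + 1) plan.reverse = rest := by
      have h : List.drop 1 (List.drop k plan.reverse) = List.drop (k + 1) plan.reverse :=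
        List.drop_drop
      rw [hdrop] at h
      simpa using h.symm
    show shiftRow (pvPrevU plan dj k) dj row.length :: sweepGo dj (some (row, _)) rest = _
    rw [hrow, pvShiftRow_up plan dj hdj k hk]
    have hprev : some (plan.getD (plan.length - 1 - k) [], pvVisRow plan 1 dj (plan.length - 1 - k)) =
        pvPrevU plan dj (k + 1) := rfl
    rw [hprev, ih (k + 1) hrest, List.length_cons, List.range_succ_eq_map, List.map_cons,
      List.map_map]
    congr 1
    refine List.map_congr_left fun t _ => ?_
    simp only [Function.comp_apply]
    congr 1
    omega

-- the left-to-right scan computes any g satisfying its recurrence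
lemma pvScanGo_correct :
    ∀ (l : List Int) (g : Nat → Int) (s : Int), g 0 = s →
      (∀ t, t + 1 < l.length → g (t + 1) = if l.getD t 0 > 0 then l.getD t 0 else g t) →
      scanGo s l = (List.range l.length).map (fun t => g t) := by
  intro l
  induction l with
  | nil => intro g s _ _; rfl
  | cons v rest ih =>
    intro g s h0 hrec
    show s :: scanGo (if v > 0 then v else s) rest = _
    rw [List.length_cons, List.range_succ_eq_map, List.map_cons, List.map_map]
    congr 1
    · exact h0.symm
    · cases rest with
      | nil => rfl
      | cons w rest' =>
        have h1 : g 1 = if v > 0 then v else s := by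
          have := hrec 0 (by simp)
          simpa [h0] using this
        exact ih (fun t => g (t + 1)) (if v > 0 then v else s) h1
          (fun t ht => by simpa [List.getD_cons_succ] using hrec (t + 1) (by simpa using ht))

lemma pvScanRow_correct (plan : List (List Int)) (i : Nat) :
    scanRow (plan.getD i []) = pvVisRow plan 0 (-1) i := by
  have hne : ¬((0 : Int) = 0 ∧ (-1 : Int) = 0) := by simp
  apply pvScanGo_correct (plan.getD i []) (fun j => pvF plan 0 (-1) (i : Int) (j : Int)) 0
  · rw [pvF_step plan 0 (-1) (Or.inr (Or.inl rfl)) (Or.inl rfl) hne i 0,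
      if_pos (Or.inr (by omega))]
  · intro t ht
    by_cases hiR : i < plan.length
    · rw [pvF_step plan 0 (-1) (Or.inr (Or.inl rfl)) (Or.inl rfl) hne i (t + 1),
        if_neg (by omega), show (i : Int) + 0 = (i : Int) by ring,
        show ((t + 1 : Nat) : Int) + (-1) = (t : Int) by push_cast; ring,
        pvCell?_some_of plan _ _ _ (pvGet_lt plan (i : Int) [] (by omega) (by omega))]
      simp only [Int.toNat_natCast]
      rw [pvGet_lt _ _ 0 (by omega) (by omega)]
      simp only [Int.toNat_natCast]
    · -- row i does not exist: plan.getD i [] = [] contradicts t + 1 < its length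
      exfalso
      have hnil : (plan.getD i []).length = 0 := by
        rw [List.getD_eq_getElem?_getD, List.getElem?_eq_none (by omega)]
        rfl
      omega

lemma pvScanRev_correct (plan : List (List Int)) (i : Nat) (hi : i < plan.length) :
    scanRev (plan.getD i []) = pvVisRow plan 0 1 i := by
  have hne : ¬((0 : Int) = 0 ∧ (1 : Int) = 0) := by simp
  set r := plan.getD i [] with hr
  cases hlen : r.length with
  | zero =>
    have hnil : r = [] := List.eq_nil_of_length_eq_zero hlen
    rw [pvVisRow, ← hr, hlen]
    simp [scanRev, hnil, scanGo]
  | succ m =>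
    unfold scanRev
    rw [pvScanGo_correct r.reverse
        (fun t => pvF plan 0 1 (i : Int) ((r.length - 1 - t : Nat) : Int)) 0
        ?g0 ?grec]
    case g0 =>
      dsimp only
      rw [pvF_step plan 0 1 (Or.inr (Or.inl rfl)) (Or.inr (Or.inr rfl)) hne i (r.length - 1 - 0),
        if_neg (by omega), show (i : Int) + 0 = (i : Int) by ring,
        pvCell?_some_of plan _ _ _ (pvGet_lt plan (i : Int) [] (by omega) (by omega))]
      simp only [Int.toNat_natCast]
      rw [pvGet_ge _ _ (by omega) (by rw [← hr]; omega)]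
    case grec =>
      intro t ht
      dsimp only
      rw [List.length_reverse] at ht
      rw [pvF_step plan 0 1 (Or.inr (Or.inl rfl)) (Or.inr (Or.inr rfl)) hne i
          (r.length - 1 - (t + 1)),
        if_neg (by omega), show (i : Int) + 0 = (i : Int) by ring,
        show ((r.length - 1 - (t + 1) : Nat) : Int) + 1 = ((r.length - 1 - t : Nat) : Int) by omega,
        pvCell?_some_of plan _ _ _ (pvGet_lt plan (i : Int) [] (by omega) (by omega))]
      simp only [Int.toNat_natCast]
      rw [← hr, pvGet_lt _ _ 0 (by omega) (by omega)]
      simp only [Int.toNat_natCast]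
      have hget : r.reverse.getD t 0 = r.getD (r.length - 1 - t) 0 := by
        rw [List.getD_eq_getElem r.reverse 0 (by rw [List.length_reverse]; omega),
          List.getElem_reverse, List.getD_eq_getElem r 0 (by omega)]
      rw [hget]
    rw [List.length_reverse, pvRevMapRange, pvVisRow, ← hr]
    refine List.map_congr_left fun t htm => ?_
    rw [List.mem_range] at htm
    congr 2
    omega

-- each of B's eight tables is the canonical vis table of its direction
lemma pvTableD (plan : List (List Int)) (dj : Int) (hdj : dj = -1 ∨ dj = 0 ∨ dj = 1) :
    sweep plan dj = (List.range plan.length).map (fun t => pvVisRow plan (-1) dj t) := by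
  have h := pvSweep_down plan dj hdj plan 0 List.drop_zero
  rw [show pvPrevD plan dj 0 = none from rfl] at h
  rw [sweep, h]
  exact List.map_congr_left fun t _ => by rw [Nat.zero_add]

lemma pvTableU (plan : List (List Int)) (dj : Int) (hdj : dj = -1 ∨ dj = 0 ∨ dj = 1) :
    (sweepGo dj none plan.reverse).reverse =
      (List.range plan.length).map (fun t => pvVisRow plan 1 dj t) := by
  have h := pvSweep_up plan dj hdj plan.reverse 0 List.drop_zero
  rw [show pvPrevU plan dj 0 = none from rfl] at h
  rw [h, List.length_reverse, pvRevMapRange]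
  refine List.map_congr_left fun t htm => ?_
  rw [List.mem_range] at htm
  congr 1
  omega

lemma pvTableL (plan : List (List Int)) :
    plan.map scanRow = (List.range plan.length).map (fun t => pvVisRow plan 0 (-1) t) := by
  apply List.ext_getElem (by simp)
  intro t h1 h2
  have ht : t < plan.length := by simpa using h1
  simp only [List.getElem_map, List.getElem_range]
  rw [show plan[t]'ht = plan.getD t [] from (List.getD_eq_getElem plan [] ht).symm]
  exact pvScanRow_correct plan t

lemma pvTableR (plan : List (List Int)) :
    plan.map scanRev = (List.range plan.length).map (fun t => pvVisRow plan 0 1 t) := by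
  apply List.ext_getElem (by simp)
  intro t h1 h2
  have ht : t < plan.length := by simpa using h1
  simp only [List.getElem_map, List.getElem_range]
  rw [show plan[t]'ht = plan.getD t [] from (List.getD_eq_getElem plan [] ht).symm]
  exact pvScanRev_correct plan t ht

-- reading a canonical table at a valid cell yields pvF
lemma pvTable_entry (plan : List (List Int)) (di dj : Int) (t u : Nat)
    (ht : t < plan.length) (hu : u < (plan.getD t []).length) :
    PySem.List.pyGetD
        (PySem.List.pyGetD ((List.range plan.length).map (fun t' => pvVisRow plan di dj t')) (t : Int) [])
        (u : Int) 0 = pvF plan di dj (t : Int) (u : Int) := by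
  rw [PySem.List.pyGetD_natCast, PySem.List.pyGetD_natCast,
    List.getD_eq_getElem _ [] (by simpa using ht), List.getElem_map, List.getElem_range,
    pvVisRow, List.getD_eq_getElem _ 0 (by simpa using hu), List.getElem_map, List.getElem_range]

lemma pvAddIf (c : Prop) [Decidable c] (x : Int) :
    (if c then x + 1 else x) = x + (if c then 1 else 0) := by
  split <;> simp

-- the per-cell occupancy counts agree
lemma pvCounts (plan : List (List Int)) (t u : Nat)
    (ht : t < plan.length) (hu : u < (plan.getD t []).length) :
    get_adjacent_occupied_seats plan (t : Int) (u : Int) =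
      ([sweep plan (-1), sweep plan 0, sweep plan 1,
        (sweepGo (-1) none plan.reverse).reverse,
        (sweepGo 0 none plan.reverse).reverse,
        (sweepGo 1 none plan.reverse).reverse,
        plan.map scanRow, plan.map scanRev] : List (List (List Int))).foldl
        (fun occ T =>
          if PySem.List.pyGetD (PySem.List.pyGetD T (t : Int) []) (u : Int) 0 = 2 then occ + 1
          else occ) 0 := by
  rw [pvTableD plan (-1) (Or.inl rfl), pvTableD plan 0 (Or.inr (Or.inl rfl)),
    pvTableD plan 1 (Or.inr (Or.inr rfl)),
    pvTableU plan (-1) (Or.inl rfl), pvTableU plan 0 (Or.inr (Or.inl rfl)),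
    pvTableU plan 1 (Or.inr (Or.inr rfl)), pvTableL plan, pvTableR plan]
  simp only [List.foldl_cons, List.foldl_nil,
    pvTable_entry plan _ _ t u ht hu,
    get_adjacent_occupied_seats, pvDirections, pvF, pvAddIf]
  ring

-- a member of Python's enumerate is an (index, element) pair
lemma pvMemEnum {α : Type} (l : List α) (p : Int × α) (hp : p ∈ PySem.List.enumerate l 0) :
    ∃ t : Nat, ∃ _ : t < l.length, p = ((t : Int), l[t]) := by
  obtain ⟨t, hget⟩ := List.mem_iff_getElem?.mp hp
  have htl : t < l.length := by
    have := (List.getElem?_eq_some_iff.mp hget).1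
    simpa [PySem.List.length_enumerate] using this
  have henum : (PySem.List.enumerate l 0)[t]? = some ((t : Int), l[t]) := by simp [pysem]
  rw [henum] at hget
  exact ⟨t, htl, (Option.some_inj.mp hget).symm⟩

-- ===== VERDICT (by name: the statement is the Claim_ definition above) =====
theorem run_round_spec : Claim_equal_run_round := by
  intro plan _
  unfold Spec_run_round run_round run_round_alt
  simp only [PySem.List.foldl_append_singleton_eq_map, List.nil_append]
  refine List.map_congr_left fun p hp => ?_
  obtain ⟨t, ht, rfl⟩ := pvMemEnum plan p hp
  refine List.map_congr_left fun q hq => ?_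
  obtain ⟨u, hu, rfl⟩ := pvMemEnum plan[t] q hq
  have hu' : u < (plan.getD t []).length := by
    rwa [List.getD_eq_getElem plan [] ht]
  show (let adj := get_adjacent_occupied_seats plan (t : Int) (u : Int); _) = _
  rw [pvCounts plan t u ht hu']
  rfl
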